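-- pv_equiv track=rewrite | github.com/Freeb1e/Frodo_ACceleration_Engine | py/bprime_s_accum_trace.py | trace_dot
-- ===== SOURCE A (Python) =====
-- from typing import List, Sequence, Tuple
--
-- def trace_dot(
--     b_row: Sequence[int],
--     s_col: Sequence[int],
--     mode: str,
-- ) -> Tuple[int, List[str]]:
--     if len(b_row) != len(s_col):
--         raise ValueError("dot dimension mismatch")
--
--     lines: List[str] = []
--
--     if mode == "hw16":
--         acc = 0
--         for k, (b, s) in enumerate(zip(b_row, s_col)):
--             b16 = b & 0xFFFF
--             s16 = s & 0xFFFF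
--             prod = (b16 * s16) & 0xFFFFFFFF
--             nxt = (acc + prod) & 0xFFFF
--             lines.append(
--                 f"k={k:4d}  b=0x{b16:04X}  s=0x{s16:04X}  prod=0x{prod:08X}  acc: 0x{acc:04X} -> 0x{nxt:04X}"
--             )
--             acc = nxt
--         return acc, lines
--
--     if mode == "signed":
--         acc = 0
--         for k, (b, s) in enumerate(zip(b_row, s_col)):
--             prod = b * s
--             nxt = acc + prod
--             lines.append(
--                 f"k={k:4d}  b={b:7d}  s={s:7d}  prod={prod:11d}  acc: {acc:11d} -> {nxt:11d}"
--             )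
--             acc = nxt
--         return acc, lines
--
--     raise ValueError(f"unsupported mode: {mode}")
-- ===== SOURCE B (Python) =====
-- from typing import List, Sequence, Tuple
--
--
-- def _scan(prods, step):
--     # prefix accumulators: accs[0] = 0, accs[i+1] = step(accs[i], prods[i])
--     accs = [0]
--     for p in prods:
--         accs.append(step(accs[-1], p))
--     return accs
--
--
-- def trace_dot(
--     b_row: Sequence[int],
--     s_col: Sequence[int],
--     mode: str,
-- ) -> Tuple[int, List[str]]:
--     if len(b_row) != len(s_col):
--         raise ValueError("dot dimension mismatch")
--
--     if mode == "hw16":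
--         pairs = [(b & 0xFFFF, s & 0xFFFF) for b, s in zip(b_row, s_col)]
--         prods = [(b * s) & 0xFFFFFFFF for b, s in pairs]
--         accs = _scan(prods, lambda a, p: (a + p) & 0xFFFF)
--         lines = [
--             f"k={k:4d}  b=0x{b:04X}  s=0x{s:04X}  prod=0x{p:08X}  acc: 0x{a:04X} -> 0x{n:04X}"
--             for k, ((b, s), p, a, n) in enumerate(zip(pairs, prods, accs, accs[1:]))
--         ]
--         return accs[-1], lines
--
--     if mode == "signed":
--         prods = [b * s for b, s in zip(b_row, s_col)]
--         accs = _scan(prods, lambda a, p: a + p)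
--         lines = [
--             f"k={k:4d}  b={b:7d}  s={s:7d}  prod={p:11d}  acc: {a:11d} -> {n:11d}"
--             for k, ((b, s), p, a, n) in enumerate(
--                 zip(zip(b_row, s_col), prods, accs, accs[1:])
--             )
--         ]
--         return accs[-1], lines
--
--     raise ValueError(f"unsupported mode: {mode}")
-- ===== Notes on version B (the rewrite author's own statement) =====
-- stated objective: alternative
-- what changed: Replaces A's single fused loop (accumulator + line formatting interleaved, appending per step) with a staged pipeline: map the masked operand pairs, map the products, build the prefix-accumulator list with one scan, then format all lines in a separate pass over the zipped table.
import Mathlib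
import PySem

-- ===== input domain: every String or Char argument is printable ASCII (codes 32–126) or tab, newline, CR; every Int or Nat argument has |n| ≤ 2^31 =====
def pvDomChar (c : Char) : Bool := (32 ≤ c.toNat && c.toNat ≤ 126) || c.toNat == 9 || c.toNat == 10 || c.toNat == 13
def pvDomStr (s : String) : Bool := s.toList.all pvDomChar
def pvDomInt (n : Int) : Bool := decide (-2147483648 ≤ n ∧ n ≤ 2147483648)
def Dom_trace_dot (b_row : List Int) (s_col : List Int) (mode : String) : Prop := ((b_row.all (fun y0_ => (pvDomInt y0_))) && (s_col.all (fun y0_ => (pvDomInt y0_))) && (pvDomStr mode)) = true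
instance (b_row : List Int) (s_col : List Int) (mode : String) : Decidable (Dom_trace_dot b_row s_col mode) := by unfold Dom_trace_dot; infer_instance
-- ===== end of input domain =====

-- B restructures A's single fused trace loop into a staged pipeline (map pairs, map products,
-- scan accumulators, then a separate formatting pass); same O(n) cost, return values proved equal.

-- == shared formatting helpers (both Pythons use the identical f-string formats) ==

-- Python f"{n:Wd}": str(n) right-aligned with spaces to width W (exact)
def padDec (w : Nat) (n : Int) : List Char :=
  let cs := PySem.Int.toChars n
  List.replicate (w - cs.length) ' ' ++ cs

-- one uppercase hex digit (n < 16)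
def hexDigitChar (n : Nat) : Char :=
  if n < 10 then Char.ofNat (48 + n) else Char.ofNat (55 + n)

-- uppercase hex digits of a Nat ([] for 0); exact for format(n, 'X') when combined with padHex
def natHexChars : Nat → List Char
  | 0 => []
  | n + 1 => natHexChars ((n + 1) / 16) ++ [hexDigitChar ((n + 1) % 16)]
decreasing_by exact Nat.div_lt_self (Nat.succ_pos n) (by decide)

-- Python f"{n:0WX}" for 0 ≤ n (all hex-formatted values here are masked, hence nonnegative): exact
def padHex (w : Nat) (n : Int) : List Char :=
  let cs := natHexChars n.toNat
  List.replicate (w - cs.length) '0' ++ cs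

-- the hw16 f-string line
def fmtHw (k b16 s16 prod acc nxt : Int) : String :=
  String.ofList ("k=".toList ++ padDec 4 k ++ "  b=0x".toList ++ padHex 4 b16 ++
    "  s=0x".toList ++ padHex 4 s16 ++ "  prod=0x".toList ++ padHex 8 prod ++
    "  acc: 0x".toList ++ padHex 4 acc ++ " -> 0x".toList ++ padHex 4 nxt)

-- the signed f-string line
def fmtSigned (k b s prod acc nxt : Int) : String :=
  String.ofList ("k=".toList ++ padDec 4 k ++ "  b=".toList ++ padDec 7 b ++
    "  s=".toList ++ padDec 7 s ++ "  prod=".toList ++ padDec 11 prod ++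
    "  acc: ".toList ++ padDec 11 acc ++ " -> ".toList ++ padDec 11 nxt)

-- ===== PORT A =====
-- the two 'raise ValueError' paths return a dummy (0, []); they are excluded by Pre_trace_dot
def trace_dot (b_row : List Int) (s_col : List Int) (mode : String) : Int × List String :=
  if b_row.length ≠ s_col.length then (0, [])
  else if mode = "hw16" then
    (PySem.List.enumerate (b_row.zip s_col) 0).foldl
      (fun (st : Int × List String) kp =>
        let b16 := PySem.Int.band kp.2.1 0xFFFF
        let s16 := PySem.Int.band kp.2.2 0xFFFF
        let prod := PySem.Int.band (b16 * s16) 0xFFFFFFFF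
        let nxt := PySem.Int.band (st.1 + prod) 0xFFFF
        (nxt, st.2 ++ [fmtHw kp.1 b16 s16 prod st.1 nxt]))
      (0, [])
  else if mode = "signed" then
    (PySem.List.enumerate (b_row.zip s_col) 0).foldl
      (fun (st : Int × List String) kp =>
        let prod := kp.2.1 * kp.2.2
        let nxt := st.1 + prod
        (nxt, st.2 ++ [fmtSigned kp.1 kp.2.1 kp.2.2 prod st.1 nxt]))
      (0, [])
  else (0, [])

-- ===== PORT B =====
-- _scan from Source B: accs[0] = 0, accs[i+1] = step accs[i] prods[i]
def pyScanAux (step : Int → Int → Int) (a : Int) : List Int → List Int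
  | [] => []
  | p :: ps => let n := step a p; n :: pyScanAux step n ps

def pyScan (step : Int → Int → Int) (ps : List Int) : List Int := 0 :: pyScanAux step 0 ps

def trace_dot_alt (b_row : List Int) (s_col : List Int) (mode : String) : Int × List String :=
  if b_row.length ≠ s_col.length then (0, [])
  else if mode = "hw16" then
    let pairs := (b_row.zip s_col).map
      (fun bs => (PySem.Int.band bs.1 0xFFFF, PySem.Int.band bs.2 0xFFFF))
    let prods := pairs.map (fun v => PySem.Int.band (v.1 * v.2) 0xFFFFFFFF)
    let accs := pyScan (fun a p => PySem.Int.band (a + p) 0xFFFF) prods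
    let lines := (PySem.List.enumerate (pairs.zip (prods.zip (accs.zip accs.tail))) 0).map
      (fun e => fmtHw e.1 e.2.1.1 e.2.1.2 e.2.2.1 e.2.2.2.1 e.2.2.2.2)
    (accs.getLastD 0, lines)
  else if mode = "signed" then
    let prods := (b_row.zip s_col).map (fun v => v.1 * v.2)
    let accs := pyScan (fun a p => a + p) prods
    let lines := (PySem.List.enumerate ((b_row.zip s_col).zip (prods.zip (accs.zip accs.tail))) 0).map
      (fun e => fmtSigned e.1 e.2.1.1 e.2.1.2 e.2.2.1 e.2.2.2.1 e.2.2.2.2)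
    (accs.getLastD 0, lines)
  else (0, [])

-- ===== PRECONDITION & SPEC =====
-- Pre_ excludes exactly the inputs where A raises ValueError: unequal lengths or an unsupported mode.
def Pre_trace_dot (b_row : List Int) (s_col : List Int) (mode : String) : Prop :=
  b_row.length = s_col.length ∧ (mode = "hw16" ∨ mode = "signed")
instance (b_row : List Int) (s_col : List Int) (mode : String) : Decidable (Pre_trace_dot b_row s_col mode) := by unfold Pre_trace_dot; infer_instance
def pvWitness_trace_dot : List Int × List Int × String := ([1, -2], [70000, 3], "hw16")

def Spec_trace_dot (b_row : List Int) (s_col : List Int) (mode : String) (out : Int × List String) : Prop := out = trace_dot_alt b_row s_col mode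
instance (b_row : List Int) (s_col : List Int) (mode : String) (out : Int × List String) : Decidable (Spec_trace_dot b_row s_col mode out) := by unfold Spec_trace_dot; infer_instance

-- ===== CLAIM (what is proved, stated in full; the proofs are below) =====
def Claim_equal_trace_dot : Prop := ∀ (b_row : List Int) (s_col : List Int) (mode : String), Dom_trace_dot b_row s_col mode → Pre_trace_dot b_row s_col mode → Spec_trace_dot b_row s_col mode (trace_dot b_row s_col mode)

-- ===== LEMMAS AND PROOFS =====

-- loop invariant, hw16 mode: A's fused fold from any (acc, ls) and index k equals B's staged
-- pipeline seeded with accumulator acc, with ls prefixed to the formatted lines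
theorem hw_loop (zs : List (Int × Int)) : ∀ (k acc : Int) (ls : List String),
    (PySem.List.enumerate zs k).foldl
      (fun (st : Int × List String) kp =>
        let b16 := PySem.Int.band kp.2.1 0xFFFF
        let s16 := PySem.Int.band kp.2.2 0xFFFF
        let prod := PySem.Int.band (b16 * s16) 0xFFFFFFFF
        let nxt := PySem.Int.band (st.1 + prod) 0xFFFF
        (nxt, st.2 ++ [fmtHw kp.1 b16 s16 prod st.1 nxt]))
      (acc, ls)
    =
    (let pairs := zs.map (fun bs => (PySem.Int.band bs.1 0xFFFF, PySem.Int.band bs.2 0xFFFF))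
     let prods := pairs.map (fun v => PySem.Int.band (v.1 * v.2) 0xFFFFFFFF)
     let accs := acc :: pyScanAux (fun a p => PySem.Int.band (a + p) 0xFFFF) acc prods
     (accs.getLastD 0,
      ls ++ (PySem.List.enumerate (pairs.zip (prods.zip (accs.zip accs.tail))) k).map
        (fun e => fmtHw e.1 e.2.1.1 e.2.1.2 e.2.2.1 e.2.2.2.1 e.2.2.2.2))) := by
  induction zs with
  | nil => intro k acc ls; simp [PySem.List.enumerate, pyScanAux]
  | cons z rest ih =>
    intro k acc ls
    simp only [PySem.List.enumerate_cons, List.foldl_cons, List.map_cons, pyScanAux,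
      List.zip_cons_cons, List.tail_cons, List.map, List.getLastD_cons]
    rw [ih]
    simp [-List.getLastD_eq_getLast?, List.getLastD_cons, List.append_assoc]

-- loop invariant, signed mode
theorem signed_loop (zs : List (Int × Int)) : ∀ (k acc : Int) (ls : List String),
    (PySem.List.enumerate zs k).foldl
      (fun (st : Int × List String) kp =>
        let prod := kp.2.1 * kp.2.2
        let nxt := st.1 + prod
        (nxt, st.2 ++ [fmtSigned kp.1 kp.2.1 kp.2.2 prod st.1 nxt]))
      (acc, ls)
    =
    (let prods := zs.map (fun v => v.1 * v.2)
     let accs := acc :: pyScanAux (fun a p => a + p) acc prods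
     (accs.getLastD 0,
      ls ++ (PySem.List.enumerate (zs.zip (prods.zip (accs.zip accs.tail))) k).map
        (fun e => fmtSigned e.1 e.2.1.1 e.2.1.2 e.2.2.1 e.2.2.2.1 e.2.2.2.2))) := by
  induction zs with
  | nil => intro k acc ls; simp [PySem.List.enumerate, pyScanAux]
  | cons z rest ih =>
    intro k acc ls
    simp only [PySem.List.enumerate_cons, List.foldl_cons, List.map_cons, pyScanAux,
      List.zip_cons_cons, List.tail_cons, List.map, List.getLastD_cons]
    rw [ih]
    simp [-List.getLastD_eq_getLast?, List.getLastD_cons, List.append_assoc]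

-- ===== VERDICT (by name: the statement is the Claim_ definition above) =====
theorem trace_dot_spec : Claim_equal_trace_dot := by
  intro b_row s_col mode _ hpre
  obtain ⟨hlen, hmode⟩ := hpre
  unfold Spec_trace_dot trace_dot trace_dot_alt
  rcases hmode with h | h <;> subst h
  · conv_lhs => rw [if_neg (not_ne_iff.mpr hlen), if_pos rfl]
    conv_rhs => rw [if_neg (not_ne_iff.mpr hlen), if_pos rfl]
    rw [hw_loop (b_row.zip s_col) 0 0 []]
    simp [pyScan]
  · conv_lhs => rw [if_neg (not_ne_iff.mpr hlen), if_neg (show ¬("signed" = "hw16") by decide), if_pos rfl]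
    conv_rhs => rw [if_neg (not_ne_iff.mpr hlen), if_neg (show ¬("signed" = "hw16") by decide), if_pos rfl]
    rw [signed_loop (b_row.zip s_col) 0 0 []]
    simp [pyScan]
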